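-- pv_equiv track=rewrite | github.com/i2mb/i2mb-dashboard | dashboard/text_utils.py | text_wrapper
-- ===== SOURCE A (Python) =====
-- def text_wrapper(text: str, num_lines=2, min_width=None):
--     """Wrap text into num_lines. Text must be at least min_width before wrapping into num_lines"""
--     if min_width is not None and len(text) < min_width:
--         return [text]
--
--     if num_lines <= 1:
--         return [text]
--
--     if num_lines >= len(text.split()):
--         return text.split()
--
--     mid_point = len(text) // num_lines
--     left_space = text[:mid_point].rfind(" ", )
--     right_space = text.find(" ", mid_point)
--
--     lines = []
--     wrapping_point = left_space
--     if (mid_point - left_space) >= (right_space - mid_point):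
--         wrapping_point = right_space
--
--     lines.append(text[:wrapping_point])
--     lines.extend(text_wrapper(text[wrapping_point+1:], num_lines=num_lines-1, min_width=min_width))
--     return lines
-- ===== SOURCE B (Python) =====
-- def text_wrapper(text: str, num_lines=2, min_width=None):
--     """Iterative rewrite: a while loop carrying (lines, remaining, n) instead of recursion."""
--     lines = []
--     remaining = text
--     n = num_lines
--     while True:
--         if (min_width is not None and len(remaining) < min_width) or n <= 1:
--             lines.append(remaining)
--             return lines
--         words = remaining.split()
--         if n >= len(words):
--             lines.extend(words)
--             return lines
--         mid = len(remaining) // n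
--         left = remaining[:mid].rfind(" ")
--         right = remaining.find(" ", mid)
--         wp = right if right - mid <= mid - left else left
--         lines.append(remaining[:wp])
--         remaining = remaining[wp + 1:]
--         n -= 1
-- ===== Notes on version B (the rewrite author's own statement) =====
-- stated objective: alternative
-- what changed: Replaced A's self-recursion (which rebuilds the result by consing each line onto the recursive call) with a single while loop that carries an explicit accumulator list, the remaining text and the decremented line count, returning the accumulated lines at a base case.
import Mathlib
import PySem

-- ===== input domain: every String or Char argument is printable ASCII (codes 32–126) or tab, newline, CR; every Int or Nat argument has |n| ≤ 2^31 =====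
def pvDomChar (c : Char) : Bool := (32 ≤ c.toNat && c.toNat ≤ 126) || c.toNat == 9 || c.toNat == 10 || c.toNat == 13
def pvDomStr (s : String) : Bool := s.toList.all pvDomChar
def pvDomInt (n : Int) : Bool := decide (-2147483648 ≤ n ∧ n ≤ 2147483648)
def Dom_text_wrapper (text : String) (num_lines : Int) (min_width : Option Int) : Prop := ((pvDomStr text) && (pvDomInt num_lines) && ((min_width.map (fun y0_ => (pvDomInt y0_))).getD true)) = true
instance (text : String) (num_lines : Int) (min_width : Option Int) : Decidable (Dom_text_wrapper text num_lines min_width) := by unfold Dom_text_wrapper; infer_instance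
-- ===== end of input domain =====

-- B replaces A's recursion by a while loop carrying (lines, remaining, n); same return value (objective: alternative decomposition).

-- ===== PORT A =====
def text_wrapper (text : String) (num_lines : Int) (min_width : Option Int) : List String :=
  if (min_width.elim false (fun w => decide ((PySem.Str.len text : Int) < w))) then [text]
  else if h1 : num_lines ≤ 1 then [text]
  else if num_lines ≥ ((PySem.Str.split₀ text).length : Int) then PySem.Str.split₀ text
  else
    let mid_point := PySem.Int.floordiv (PySem.Str.len text : Int) num_lines
    let left_space := PySem.Str.rfind (PySem.Str.slice text none (some mid_point)) " "
    let right_space := PySem.Str.findFrom text " " mid_point none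
    let wrapping_point := if mid_point - left_space ≥ right_space - mid_point then right_space else left_space
    (PySem.Str.slice text none (some wrapping_point)) ::
      text_wrapper (PySem.Str.slice text (some (wrapping_point + 1)) none) (num_lines - 1) min_width
termination_by num_lines.toNat
decreasing_by omega

-- ===== PORT B =====
def text_wrapper_loop (lines : List String) (remaining : String) (n : Int) (min_width : Option Int) : List String :=
  if h1 : (min_width.elim false (fun w => decide ((PySem.Str.len remaining : Int) < w))) || decide (n ≤ 1) then
    lines ++ [remaining]
  else
    let words := PySem.Str.split₀ remaining
    if n ≥ (words.length : Int) then lines ++ words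
    else
      let mid := PySem.Int.floordiv (PySem.Str.len remaining : Int) n
      let left := PySem.Str.rfind (PySem.Str.slice remaining none (some mid)) " "
      let right := PySem.Str.findFrom remaining " " mid none
      let wp := if right - mid ≤ mid - left then right else left
      text_wrapper_loop (lines ++ [PySem.Str.slice remaining none (some wp)])
        (PySem.Str.slice remaining (some (wp + 1)) none) (n - 1) min_width
termination_by n.toNat
decreasing_by simp at h1; omega

def text_wrapper_alt (text : String) (num_lines : Int) (min_width : Option Int) : List String :=
  text_wrapper_loop [] text num_lines min_width

-- ===== PRECONDITION & SPEC =====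
def Spec_text_wrapper (text : String) (num_lines : Int) (min_width : Option Int) (out : List String) : Prop := out = text_wrapper_alt text num_lines min_width
instance (text : String) (num_lines : Int) (min_width : Option Int) (out : List String) : Decidable (Spec_text_wrapper text num_lines min_width out) := by unfold Spec_text_wrapper; infer_instance

-- ===== CLAIM (what is proved, stated in full; the proofs are below) =====
def Claim_equal_text_wrapper : Prop := ∀ (text : String) (num_lines : Int) (min_width : Option Int), Dom_text_wrapper text num_lines min_width → Spec_text_wrapper text num_lines min_width (text_wrapper text num_lines min_width)

-- ===== LEMMAS AND PROOFS =====
theorem text_wrapper_loop_eq_aux : ∀ (k : Nat) (n : Int), n.toNat < k →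
    ∀ (lines : List String) (remaining : String) (min_width : Option Int),
      text_wrapper_loop lines remaining n min_width = lines ++ text_wrapper remaining n min_width := by
  intro k
  induction k with
  | zero => intro n h; omega
  | succ k ih =>
    intro n hk lines remaining mw
    by_cases hm : (mw.elim false fun w => decide ((PySem.Str.len remaining : Int) < w)) = true
    · rw [text_wrapper_loop, dif_pos (by simp at hm ⊢; tauto), text_wrapper, if_pos hm]
    · by_cases hn : n ≤ 1
      · rw [text_wrapper_loop, dif_pos (by simp; tauto), text_wrapper, if_neg hm, dif_pos hn]
      · have hcond : ¬ ((mw.elim false fun w => decide ((PySem.Str.len remaining : Int) < w)) || decide (n ≤ 1)) = true := by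
          simp at hm ⊢
          exact ⟨hm, by omega⟩
        rw [text_wrapper_loop, dif_neg hcond, text_wrapper, if_neg hm, dif_neg hn]
        by_cases hw : n ≥ ((PySem.Str.split₀ remaining).length : Int)
        · rw [if_pos hw, if_pos hw]
        · rw [if_neg hw, if_neg hw, ih (n - 1) (by omega)]
          simp

theorem text_wrapper_loop_eq (lines : List String) (remaining : String) (n : Int) (min_width : Option Int) :
    text_wrapper_loop lines remaining n min_width = lines ++ text_wrapper remaining n min_width :=
  text_wrapper_loop_eq_aux (n.toNat + 1) n (by omega) lines remaining min_width

-- ===== VERDICT (by name: the statement is the Claim_ definition above) =====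
theorem text_wrapper_spec : Claim_equal_text_wrapper := by
  intro text num_lines min_width _
  unfold Spec_text_wrapper text_wrapper_alt
  rw [text_wrapper_loop_eq]
  simp
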